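-- pv_equiv track=rewrite | github.com/Stefan4472/simple-search-engine | stemmer.py | _p1b_eed_eedly
-- ===== SOURCE A (Python) =====
-- VOWELS = {'a', 'e', 'i', 'o', 'u'}
--
-- def _p1b_eed_eedly(term: str) -> (int, str):
--     """Replace 'eed', 'eedly' by 'ee' if it is in the part of the
--     word after the first non-vowel following a vowel.
--
--     Returns length of suffix removed, and resulting stem.
--     """
--     if term.endswith('eed'):
--         test_word = term[:-3]
--     elif term.endswith('eedly'):
--         test_word = term[:-5]
--     else:
--         return 0, term
--     first_vowel_index = _find_first_vowel(test_word)
--     if first_vowel_index == -1: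
--         return 0, term
--     else:
--         for index in range(first_vowel_index + 1, len(test_word)):
--             if test_word[index] not in VOWELS:
--                 # condition met
--                 return (3, term[:-1]) if term.endswith('eed') else (5, term[:-3])
--         return 0, term
--
-- def _find_first_vowel(term: str) -> int:
--     """Return index of first vowel found in the word, or -1
--     if no vowel is found"""
--     index = 0
--     for char in term:
--         if char in VOWELS:
--             return index
--         index += 1
--     return -1
-- ===== SOURCE B (Python) =====
-- VOWELS = {'a', 'e', 'i', 'o', 'u'}
--
-- def _p1b_eed_eedly(term: str) -> (int, str):
--     """Single-pass version: one scan of test_word with a seen_vowel flag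
--     instead of find_first_vowel followed by a second indexed scan."""
--     if term.endswith('eed'):
--         removed, stem, test_word = 3, term[:-1], term[:-3]
--     elif term.endswith('eedly'):
--         removed, stem, test_word = 5, term[:-3], term[:-5]
--     else:
--         return 0, term
--     seen_vowel = False
--     for ch in test_word:
--         if ch in VOWELS:
--             seen_vowel = True
--         elif seen_vowel:
--             return removed, stem
--     return 0, term
-- ===== Notes on version B (the rewrite author's own statement) =====
-- stated objective: simpler
-- what changed: Replaced A's two-phase test (find_first_vowel helper, then a second indexed scan after that position) with a single pass over test_word carrying a seen_vowel flag; the helper disappears and the no-vowel case needs no special branch.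
import Mathlib
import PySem

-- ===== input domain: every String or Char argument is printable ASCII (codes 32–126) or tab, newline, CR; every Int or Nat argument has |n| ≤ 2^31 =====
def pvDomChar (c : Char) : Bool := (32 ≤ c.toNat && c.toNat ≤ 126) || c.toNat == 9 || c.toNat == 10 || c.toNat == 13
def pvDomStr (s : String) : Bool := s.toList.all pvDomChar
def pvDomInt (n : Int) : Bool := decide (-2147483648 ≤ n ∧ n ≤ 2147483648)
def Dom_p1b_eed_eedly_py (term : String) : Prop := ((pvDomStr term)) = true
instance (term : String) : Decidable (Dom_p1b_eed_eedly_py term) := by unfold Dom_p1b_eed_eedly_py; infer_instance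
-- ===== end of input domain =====

-- B replaces A's two-phase scan (find_first_vowel, then a second indexed scan) by a single
-- pass over test_word carrying a seen_vowel flag; same return values everywhere (objective: simpler).

-- ===== PORT A =====
def pvVowels : List Char := ['a', 'e', 'i', 'o', 'u']

def pvIsVowel (c : Char) : Bool := pvVowels.contains c

-- _find_first_vowel: index counter starts at 0, +1 per char
def pvFindFirstVowelAux : List Char → Int → Int
  | [], _ => -1
  | c :: rest, idx => if pvIsVowel c then idx else pvFindFirstVowelAux rest (idx + 1)

-- A's inner loop: for index in range(first_vowel_index + 1, len(test_word)):
--   if test_word[index] not in VOWELS: condition met (true)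
def pvScanA (cs : List Char) : List Int → Bool
  | [] => false
  | i :: rest =>
    match PySem.List.pyGet? cs i with
    | some c => if pvIsVowel c then pvScanA cs rest else true
    | none => false   -- unreachable: range indices are in bounds

-- the body of A after test_word has been selected
def pvBodyA (term : String) (testWord : String) : Int × String :=
  let firstVowelIndex := pvFindFirstVowelAux testWord.toList 0
  if firstVowelIndex = -1 then (0, term)
  else
    if pvScanA testWord.toList
        (PySem.List.pyRange (firstVowelIndex + 1) (PySem.Str.len testWord) 1) then
      if PySem.Str.endswith term "eed" then (3, PySem.Str.slice term none (some (-1)))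
      else (5, PySem.Str.slice term none (some (-3)))
    else (0, term)

def p1b_eed_eedly_py (term : String) : Int × String :=
  if PySem.Str.endswith term "eed" then
    pvBodyA term (PySem.Str.slice term none (some (-3)))
  else if PySem.Str.endswith term "eedly" then
    pvBodyA term (PySem.Str.slice term none (some (-5)))
  else (0, term)

-- ===== PORT B =====
-- single pass: seen_vowel flag; true = "condition met", returns early in Source B
def pvSeenLoop : List Char → Bool → Bool
  | [], _ => false
  | c :: rest, seen =>
    if pvIsVowel c then pvSeenLoop rest true
    else if seen then true
    else pvSeenLoop rest seen

def pvFinishB (term : String) (removed : Int) (stem : String) (testWord : String) : Int × String :=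
  if pvSeenLoop testWord.toList false then (removed, stem) else (0, term)

def p1b_eed_eedly_py_alt (term : String) : Int × String :=
  if PySem.Str.endswith term "eed" then
    pvFinishB term 3 (PySem.Str.slice term none (some (-1))) (PySem.Str.slice term none (some (-3)))
  else if PySem.Str.endswith term "eedly" then
    pvFinishB term 5 (PySem.Str.slice term none (some (-3))) (PySem.Str.slice term none (some (-5)))
  else (0, term)

-- ===== PRECONDITION & SPEC =====
def Spec_p1b_eed_eedly_py (term : String) (out : Int × String) : Prop := out = p1b_eed_eedly_py_alt term
instance (term : String) (out : Int × String) : Decidable (Spec_p1b_eed_eedly_py term out) := by unfold Spec_p1b_eed_eedly_py; infer_instance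

-- ===== CLAIM (what is proved, stated in full; the proofs are below) =====
def Claim_equal_p1b_eed_eedly_py : Prop := ∀ (term : String), Dom_p1b_eed_eedly_py term → Spec_p1b_eed_eedly_py term (p1b_eed_eedly_py term)

-- ===== LEMMAS AND PROOFS =====

-- _find_first_vowel returns -1 or an index in [idx, idx + len)
theorem pvFindFirstVowelAux_cases (cs : List Char) :
    ∀ idx : Int, pvFindFirstVowelAux cs idx = -1 ∨
      (idx ≤ pvFindFirstVowelAux cs idx ∧ pvFindFirstVowelAux cs idx < idx + cs.length) := by
  induction cs with
  | nil => intro idx; left; rfl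
  | cons c rest ih =>
    intro idx
    by_cases hv : pvIsVowel c
    · right
      simp only [pvFindFirstVowelAux, hv, if_true, List.length_cons]
      push_cast
      omega
    · simp only [pvFindFirstVowelAux, hv, Bool.false_eq_true, if_false, List.length_cons]
      rcases ih (idx + 1) with h | h
      · left; exact h
      · right; push_cast; omega

-- shifting the start index of _find_first_vowel's counter
theorem pvFindFirstVowelAux_shift (cs : List Char) :
    ∀ idx : Int, pvFindFirstVowelAux cs idx =
      if pvFindFirstVowelAux cs 0 = -1 then -1 else pvFindFirstVowelAux cs 0 + idx := by
  induction cs with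
  | nil => intro idx; simp [pvFindFirstVowelAux]
  | cons c rest ih =>
    intro idx
    by_cases hv : pvIsVowel c
    · simp [pvFindFirstVowelAux, hv]
    · simp only [pvFindFirstVowelAux, hv, Bool.false_eq_true, if_false]
      rw [ih (idx + 1), ih (0 + 1)]
      rcases pvFindFirstVowelAux_cases rest 0 with h0 | ⟨h0, -⟩
      · simp [h0]
      · have hne : pvFindFirstVowelAux rest 0 ≠ -1 := by omega
        simp only [hne, if_false]
        split_ifs with h <;> omega

-- A's second scan over range(a, len) is "some consonant in drop a"
theorem pvScanA_range (cs : List Char) :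
    ∀ a : Nat, pvScanA cs (PySem.List.pyRange (a : Int) (cs.length : Int) 1) =
      (cs.drop a).any (fun c => !pvIsVowel c) := by
  have key : ∀ n a : Nat, cs.length - a = n →
      pvScanA cs (PySem.List.pyRange (a : Int) (cs.length : Int) 1) =
        (cs.drop a).any (fun c => !pvIsVowel c) := by
    intro n
    induction n with
    | zero =>
      intro a ha
      have hge : cs.length ≤ a := by omega
      have hr : PySem.List.pyRange (a : Int) (cs.length : Int) 1 = [] := by
        simp [PySem.List.pyRange_one]
        omega
      rw [hr, List.drop_eq_nil_of_le hge]
      rfl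
    | succ n ih =>
      intro a ha
      have hlt : a < cs.length := by omega
      rw [PySem.List.pyRange_one_cons (by exact_mod_cast hlt)]
      have hget : PySem.List.pyGet? cs (a : Int) = some cs[a] := by
        simp [PySem.List.pyGet?_natCast, List.getElem?_eq_getElem hlt]
      have hcast : (a : Int) + 1 = ((a + 1 : Nat) : Int) := by push_cast; ring
      rw [List.drop_eq_getElem_cons hlt]
      simp only [pvScanA, hget, List.any_cons]
      by_cases hv : pvIsVowel cs[a]
      · simp only [hv, if_true, Bool.not_true, Bool.false_or]
        rw [hcast]
        exact ih (a + 1) (by omega)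
      · simp [hv]
  intro a; exact key (cs.length - a) a rfl

-- B's loop with seen_vowel already true is "some consonant remains"
theorem pvSeenLoop_true (cs : List Char) :
    pvSeenLoop cs true = cs.any (fun c => !pvIsVowel c) := by
  induction cs with
  | nil => rfl
  | cons c rest ih =>
    by_cases hv : pvIsVowel c <;> simp [pvSeenLoop, hv, ih]

-- core: A's two-phase condition equals B's single-pass condition
theorem pvCond_eq (cs : List Char) :
    (if pvFindFirstVowelAux cs 0 = -1 then false
     else pvScanA cs (PySem.List.pyRange (pvFindFirstVowelAux cs 0 + 1) (cs.length : Int) 1))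
    = pvSeenLoop cs false := by
  induction cs with
  | nil => rfl
  | cons c rest ih =>
    by_cases hv : pvIsVowel c
    · -- first vowel at index 0
      have h0 : pvFindFirstVowelAux (c :: rest) 0 = 0 := by simp [pvFindFirstVowelAux, hv]
      have h1 : ((0 : Int) + 1) = ((1 : Nat) : Int) := by norm_num
      rw [h0, if_neg (by norm_num : ¬ ((0 : Int) = -1)), h1,
        pvScanA_range (c :: rest) 1]
      simp [pvSeenLoop, hv, pvSeenLoop_true]
    · have hstep : pvFindFirstVowelAux (c :: rest) 0 =
          if pvFindFirstVowelAux rest 0 = -1 then -1 else pvFindFirstVowelAux rest 0 + 1 := by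
        simp only [pvFindFirstVowelAux, hv, Bool.false_eq_true, if_false]
        rw [pvFindFirstVowelAux_shift rest (0 + 1)]
        norm_num
      have hseen : pvSeenLoop (c :: rest) false = pvSeenLoop rest false := by
        simp [pvSeenLoop, hv]
      rw [hseen, ← ih, hstep]
      by_cases h0 : pvFindFirstVowelAux rest 0 = -1
      · simp [h0]
      · rcases pvFindFirstVowelAux_cases rest 0 with h | ⟨hge, hlt⟩
        · exact absurd h h0
        · set j : Nat := (pvFindFirstVowelAux rest 0).toNat with hj
          have hjv : pvFindFirstVowelAux rest 0 = (j : Int) := by omega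
          simp only [h0, if_false]
          have hc1 : (j : Int) + 1 + 1 = ((j + 2 : Nat) : Int) := by push_cast; ring
          have hc2 : (j : Int) + 1 = ((j + 1 : Nat) : Int) := by push_cast; ring
          rw [hjv, if_neg (by omega : ¬ ((j : Int) + 1 = -1)), hc1]
          have hA := pvScanA_range (c :: rest) (j + 2)
          simp only [List.length_cons] at hA ⊢
          rw [hA, hc2, pvScanA_range rest (j + 1)]
          simp [List.drop_succ_cons]

-- ===== VERDICT (by name: the statement is the Claim_ definition above) =====
theorem p1b_eed_eedly_py_spec : Claim_equal_p1b_eed_eedly_py := by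
  intro term _
  unfold Spec_p1b_eed_eedly_py p1b_eed_eedly_py p1b_eed_eedly_py_alt
  by_cases h3 : PySem.Str.endswith term "eed" = true
  · simp only [h3, if_true]
    unfold pvBodyA pvFinishB
    set tw := PySem.Str.slice term none (some (-3))
    rw [← pvCond_eq tw.toList]
    simp only [PySem.Str.len_eq, h3]
    by_cases hfv : pvFindFirstVowelAux tw.toList 0 = -1 <;> simp [hfv]
  · by_cases h5 : PySem.Str.endswith term "eedly" = true
    · simp only [h3, h5, Bool.false_eq_true, if_false, if_true]
      unfold pvBodyA pvFinishB
      set tw := PySem.Str.slice term none (some (-5))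
      rw [← pvCond_eq tw.toList]
      simp only [PySem.Str.len_eq, h3]
      by_cases hfv : pvFindFirstVowelAux tw.toList 0 = -1 <;> simp [hfv]
    · simp only [h3, h5, Bool.false_eq_true, if_false]
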